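-- pv_equiv track=rewrite | github.com/OpenXiangShan/Penglai-SagittaVerificationPlatform | tgen_reg/reg_pro_v2/parse_xml/parsing_xml.py | gen_tmp_sub_reg2
-- ===== SOURCE A (Python) =====
-- def gen_tmp_sub_reg2(b_name, r_name, addr_w, r_offset, reg_list):
--     reg_if_inst = ''
--     for field in reg_list:
--         f_name = field[0]
--         f_rw = field[3]
--         if f_rw not in ['RW', 'WO']:
--             reg_if_inst += '        .f_{_f_name}_up_data({_b_name}_if_regs.{_f_name}_in),\n'.format(
--                 _f_name=f_name,
--                 _b_name=b_name,
--                 _r_name=r_name)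
--         if f_rw not in ['RO', 'RC']:
--             if f_rw not in ['RW', 'WO']:
--                 reg_if_inst += '        .f_{_f_name}_up_en({_b_name}_if_regs.{_f_name}_wen),\n'.format(
--                     _f_name=f_name,
--                     _b_name=b_name,
--                     _r_name=r_name)
--             reg_if_inst += '        .f_{_f_name}_out({_b_name}_if_regs.{_f_name}_out),\n'.format(
--                     _f_name=f_name,
--                     _b_name=b_name,
--                     _r_name=r_name)
--         if f_rw not in ['RO', 'RC', 'RU']:
--             reg_if_inst += '        .f_{_f_name}_wr({_b_name}_if_regs.{_f_name}_wr),\n'.format(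
--                 _f_name=f_name,
--                 _b_name=b_name,
--                 _r_name=r_name)
--         if f_rw not in ['WO']:
--             reg_if_inst += '        .f_{_f_name}_rd({_b_name}_if_regs.{_f_name}_rd),\n'.format(
--                 _f_name=f_name,
--                 _b_name=b_name,
--                 _r_name=r_name)
--     reg_inner_declare = '        input       [REG_WIDTH:0] ' + 'reg_{}_up'.format(r_name).ljust(30) + ',\n'
--     reg_inner_output = '        output wire [REG_WIDTH-1:0] ' + 'reg_{}_out'.format(r_name).ljust(30) + ',\n'
--     reg_sel_declare = 'wire ' + 'reg_{}_sel'.format(r_name).ljust(30) + ';\n'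
--     reg_sel_assign = "assign " + "reg_{}_sel".format(r_name).ljust(
--         30) + " = {}_if_slave.wr_sel==1'b1 && {}_if_slave.wr_addr=='h{};\n".format(b_name, b_name, r_offset)
--     reg_rd_declare = 'wire[REG_WIDTH-1:0] ' + 'reg_{}_rd_out'.format(r_name).ljust(30) + ';\n'
--     reg_rd_connect = "            'h{} : rd_data_reg = ".format(r_offset) + 'reg_{}_rd_out'.format(
--         r_name).ljust(30) + ';\n'
--     reg_instance = '''reg_{_bn}_{_name}
--     #(
--         .REG_WIDTH(REG_WIDTH)
--      ) u_r_{_name}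
--     (
--         .clk         ( {_b_name}_if_slave.clk   ),
--         .rst_n       ( {_b_name}_if_slave.rst_n ),
-- {_reg_if_inst}
--         .reg_wr_sel  ( reg_{_name}_sel ),
--         .reg_wr_rd   ( {_b_name}_if_slave.wr_rd   ),
--         .reg_wr_data ( {_b_name}_if_slave.wr_data ),
--         .reg_rd_out  ( reg_{_name}_rd_out )
--     );
-- '''.format(_bn=b_name, _name=r_name, _b_name=b_name, _reg_if_inst=reg_if_inst)
--     return reg_inner_declare, reg_inner_output, reg_sel_declare, reg_sel_assign, reg_rd_declare, \
--            reg_rd_connect, reg_instance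
-- ===== SOURCE B (Python) =====
-- # Data-driven rewrite: a mode -> connection-suffix table replaces A's four nested
-- # membership-test branches; one join builds the whole instance connection block.
--
-- _PORT_SIG = {
--     'RW': [('out', 'out'), ('wr', 'wr'), ('rd', 'rd')],
--     'WO': [('out', 'out'), ('wr', 'wr')],
--     'RO': [('up_data', 'in'), ('rd', 'rd')],
--     'RC': [('up_data', 'in'), ('rd', 'rd')],
--     'RU': [('up_data', 'in'), ('up_en', 'wen'), ('out', 'out'), ('rd', 'rd')],
-- }
-- _PORT_SIG_DEFAULT = [('up_data', 'in'), ('up_en', 'wen'), ('out', 'out'),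
--                      ('wr', 'wr'), ('rd', 'rd')]
--
--
-- def gen_tmp_sub_reg2(b_name, r_name, addr_w, r_offset, reg_list):
--     reg_if_inst = ''.join(
--         '        .f_{0}_{1}({2}_if_regs.{0}_{3}),\n'.format(field[0], port, b_name, sig)
--         for field in reg_list
--         for port, sig in _PORT_SIG.get(field[3], _PORT_SIG_DEFAULT))
--     pad = lambda s: s.ljust(30)
--     reg_inner_declare = '        input       [REG_WIDTH:0] ' + pad('reg_{}_up'.format(r_name)) + ',\n'
--     reg_inner_output = '        output wire [REG_WIDTH-1:0] ' + pad('reg_{}_out'.format(r_name)) + ',\n'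
--     reg_sel_declare = 'wire ' + pad('reg_{}_sel'.format(r_name)) + ';\n'
--     reg_sel_assign = ('assign ' + pad('reg_{}_sel'.format(r_name)) +
--                       " = {0}_if_slave.wr_sel==1'b1 && {0}_if_slave.wr_addr=='h{1};\n".format(b_name, r_offset))
--     reg_rd_declare = 'wire[REG_WIDTH-1:0] ' + pad('reg_{}_rd_out'.format(r_name)) + ';\n'
--     reg_rd_connect = "            'h{} : rd_data_reg = ".format(r_offset) + pad('reg_{}_rd_out'.format(r_name)) + ';\n'
--     reg_instance = '''reg_{_bn}_{_name}
--     #(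
--         .REG_WIDTH(REG_WIDTH)
--      ) u_r_{_name}
--     (
--         .clk         ( {_b_name}_if_slave.clk   ),
--         .rst_n       ( {_b_name}_if_slave.rst_n ),
-- {_reg_if_inst}
--         .reg_wr_sel  ( reg_{_name}_sel ),
--         .reg_wr_rd   ( {_b_name}_if_slave.wr_rd   ),
--         .reg_wr_data ( {_b_name}_if_slave.wr_data ),
--         .reg_rd_out  ( reg_{_name}_rd_out )
--     );
-- '''.format(_bn=b_name, _name=r_name, _b_name=b_name, _reg_if_inst=reg_if_inst)
--     return reg_inner_declare, reg_inner_output, reg_sel_declare, reg_sel_assign, reg_rd_declare, \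
--            reg_rd_connect, reg_instance
-- ===== Notes on version B (the rewrite author's own statement) =====
-- stated objective: simpler
-- what changed: The four nested membership-test branches per field are replaced by a mode-to-suffix lookup table (with a full default for unknown modes) and a single ''.join over the table entries; the fixed blocks are built with one pad helper.
import Mathlib
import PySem

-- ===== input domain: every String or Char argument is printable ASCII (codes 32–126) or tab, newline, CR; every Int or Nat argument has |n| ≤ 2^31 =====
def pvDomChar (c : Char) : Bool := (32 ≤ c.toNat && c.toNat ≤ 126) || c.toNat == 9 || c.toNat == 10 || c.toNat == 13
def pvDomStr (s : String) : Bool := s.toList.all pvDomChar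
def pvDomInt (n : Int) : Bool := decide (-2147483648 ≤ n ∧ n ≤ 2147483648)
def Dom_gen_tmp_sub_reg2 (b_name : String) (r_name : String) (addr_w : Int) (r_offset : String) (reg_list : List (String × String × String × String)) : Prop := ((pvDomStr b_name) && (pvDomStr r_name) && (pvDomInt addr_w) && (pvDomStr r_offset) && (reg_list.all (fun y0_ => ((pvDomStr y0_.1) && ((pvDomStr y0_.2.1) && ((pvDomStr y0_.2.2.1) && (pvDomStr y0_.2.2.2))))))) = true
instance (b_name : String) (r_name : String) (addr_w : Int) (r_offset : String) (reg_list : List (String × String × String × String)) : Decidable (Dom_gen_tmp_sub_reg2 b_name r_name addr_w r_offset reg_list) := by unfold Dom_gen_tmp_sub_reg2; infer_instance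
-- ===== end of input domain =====

-- B replaces A's four nested membership-test branches by a mode→suffix lookup table and one join (objective: simpler).

-- str.ljust(30): exact hand port (pads with spaces to 30 code points; counts chars, as Python does)
def pyLjust (s : String) (w : Nat) : String :=
  s ++ String.ofList (List.replicate (w - s.toList.length) ' ')

-- ===== PORT A =====
-- the body of A's 'for field in reg_list' loop, step for step (four 'not in' branches, one nested)
def pvStepA (b_name : String) (reg_if_inst : String) (field : String × String × String × String) : String :=
  let f_name := field.1
  let f_rw := field.2.2.2
  let reg_if_inst :=
    if ¬ (f_rw ∈ (["RW", "WO"] : List String)) then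
      reg_if_inst ++ "        .f_" ++ f_name ++ "_up_data(" ++ b_name ++ "_if_regs." ++ f_name ++ "_in),\n"
    else reg_if_inst
  let reg_if_inst :=
    if ¬ (f_rw ∈ (["RO", "RC"] : List String)) then
      let reg_if_inst :=
        if ¬ (f_rw ∈ (["RW", "WO"] : List String)) then
          reg_if_inst ++ "        .f_" ++ f_name ++ "_up_en(" ++ b_name ++ "_if_regs." ++ f_name ++ "_wen),\n"
        else reg_if_inst
      reg_if_inst ++ "        .f_" ++ f_name ++ "_out(" ++ b_name ++ "_if_regs." ++ f_name ++ "_out),\n"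
    else reg_if_inst
  let reg_if_inst :=
    if ¬ (f_rw ∈ (["RO", "RC", "RU"] : List String)) then
      reg_if_inst ++ "        .f_" ++ f_name ++ "_wr(" ++ b_name ++ "_if_regs." ++ f_name ++ "_wr),\n"
    else reg_if_inst
  if ¬ (f_rw ∈ (["WO"] : List String)) then
    reg_if_inst ++ "        .f_" ++ f_name ++ "_rd(" ++ b_name ++ "_if_regs." ++ f_name ++ "_rd),\n"
  else reg_if_inst

def gen_tmp_sub_reg2 (b_name : String) (r_name : String) (addr_w : Int) (r_offset : String) (reg_list : List (String × String × String × String)) : String × String × String × String × String × String × String :=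
  let reg_if_inst := reg_list.foldl (pvStepA b_name) ""
  let reg_inner_declare := "        input       [REG_WIDTH:0] " ++ pyLjust ("reg_" ++ r_name ++ "_up") 30 ++ ",\n"
  let reg_inner_output := "        output wire [REG_WIDTH-1:0] " ++ pyLjust ("reg_" ++ r_name ++ "_out") 30 ++ ",\n"
  let reg_sel_declare := "wire " ++ pyLjust ("reg_" ++ r_name ++ "_sel") 30 ++ ";\n"
  let reg_sel_assign := "assign " ++ pyLjust ("reg_" ++ r_name ++ "_sel") 30 ++
    " = " ++ b_name ++ "_if_slave.wr_sel==1'b1 && " ++ b_name ++ "_if_slave.wr_addr=='h" ++ r_offset ++ ";\n"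
  let reg_rd_declare := "wire[REG_WIDTH-1:0] " ++ pyLjust ("reg_" ++ r_name ++ "_rd_out") 30 ++ ";\n"
  let reg_rd_connect := "            'h" ++ r_offset ++ " : rd_data_reg = " ++ pyLjust ("reg_" ++ r_name ++ "_rd_out") 30 ++ ";\n"
  let reg_instance := "reg_" ++ b_name ++ "_" ++ r_name ++ "\n    #(\n        .REG_WIDTH(REG_WIDTH)\n     ) u_r_" ++ r_name ++
    "\n    (\n        .clk         ( " ++ b_name ++ "_if_slave.clk   ), \n        .rst_n       ( " ++ b_name ++ "_if_slave.rst_n ),\n" ++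
    reg_if_inst ++ "\n        .reg_wr_sel  ( reg_" ++ r_name ++ "_sel ),\n        .reg_wr_rd   ( " ++ b_name ++
    "_if_slave.wr_rd   ),\n        .reg_wr_data ( " ++ b_name ++ "_if_slave.wr_data ),\n        .reg_rd_out  ( reg_" ++ r_name ++ "_rd_out )             \n    );\n"
  (reg_inner_declare, reg_inner_output, reg_sel_declare, reg_sel_assign, reg_rd_declare, reg_rd_connect, reg_instance)

-- ===== PORT B =====
def pvPortSigTable : PySem.Dict String (List (String × String)) := PySem.Dict.mk [
  ("RW", [("out", "out"), ("wr", "wr"), ("rd", "rd")]),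
  ("WO", [("out", "out"), ("wr", "wr")]),
  ("RO", [("up_data", "in"), ("rd", "rd")]),
  ("RC", [("up_data", "in"), ("rd", "rd")]),
  ("RU", [("up_data", "in"), ("up_en", "wen"), ("out", "out"), ("rd", "rd")])]

def pvPortSigDefault : List (String × String) :=
  [("up_data", "in"), ("up_en", "wen"), ("out", "out"), ("wr", "wr"), ("rd", "rd")]

-- '        .f_{0}_{1}({2}_if_regs.{0}_{3}),\n'.format(f_name, port, b_name, sig)
def pvLine (b_name : String) (f_name : String) (ps : String × String) : String :=
  "        .f_" ++ f_name ++ "_" ++ ps.1 ++ "(" ++ b_name ++ "_if_regs." ++ f_name ++ "_" ++ ps.2 ++ "),\n"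

def gen_tmp_sub_reg2_alt (b_name : String) (r_name : String) (addr_w : Int) (r_offset : String) (reg_list : List (String × String × String × String)) : String × String × String × String × String × String × String :=
  let reg_if_inst := PySem.Str.join "" (reg_list.flatMap (fun field =>
    (pvPortSigTable.getD field.2.2.2 pvPortSigDefault).map (pvLine b_name field.1)))
  let pad := fun (s : String) => pyLjust s 30
  let reg_inner_declare := "        input       [REG_WIDTH:0] " ++ pad ("reg_" ++ r_name ++ "_up") ++ ",\n"
  let reg_inner_output := "        output wire [REG_WIDTH-1:0] " ++ pad ("reg_" ++ r_name ++ "_out") ++ ",\n"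
  let reg_sel_declare := "wire " ++ pad ("reg_" ++ r_name ++ "_sel") ++ ";\n"
  let reg_sel_assign := "assign " ++ pad ("reg_" ++ r_name ++ "_sel") ++
    " = " ++ b_name ++ "_if_slave.wr_sel==1'b1 && " ++ b_name ++ "_if_slave.wr_addr=='h" ++ r_offset ++ ";\n"
  let reg_rd_declare := "wire[REG_WIDTH-1:0] " ++ pad ("reg_" ++ r_name ++ "_rd_out") ++ ";\n"
  let reg_rd_connect := "            'h" ++ r_offset ++ " : rd_data_reg = " ++ pad ("reg_" ++ r_name ++ "_rd_out") ++ ";\n"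
  let reg_instance := "reg_" ++ b_name ++ "_" ++ r_name ++ "\n    #(\n        .REG_WIDTH(REG_WIDTH)\n     ) u_r_" ++ r_name ++
    "\n    (\n        .clk         ( " ++ b_name ++ "_if_slave.clk   ), \n        .rst_n       ( " ++ b_name ++ "_if_slave.rst_n ),\n" ++
    reg_if_inst ++ "\n        .reg_wr_sel  ( reg_" ++ r_name ++ "_sel ),\n        .reg_wr_rd   ( " ++ b_name ++
    "_if_slave.wr_rd   ),\n        .reg_wr_data ( " ++ b_name ++ "_if_slave.wr_data ),\n        .reg_rd_out  ( reg_" ++ r_name ++ "_rd_out )             \n    );\n"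
  (reg_inner_declare, reg_inner_output, reg_sel_declare, reg_sel_assign, reg_rd_declare, reg_rd_connect, reg_instance)

-- ===== PRECONDITION & SPEC =====
def Spec_gen_tmp_sub_reg2 (b_name : String) (r_name : String) (addr_w : Int) (r_offset : String) (reg_list : List (String × String × String × String)) (out : String × String × String × String × String × String × String) : Prop := out = gen_tmp_sub_reg2_alt b_name r_name addr_w r_offset reg_list
instance (b_name : String) (r_name : String) (addr_w : Int) (r_offset : String) (reg_list : List (String × String × String × String)) (out : String × String × String × String × String × String × String) : Decidable (Spec_gen_tmp_sub_reg2 b_name r_name addr_w r_offset reg_list out) := by unfold Spec_gen_tmp_sub_reg2; infer_instance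

-- ===== CLAIM (what is proved, stated in full; the proofs are below) =====
def Claim_equal_gen_tmp_sub_reg2 : Prop := ∀ (b_name : String) (r_name : String) (addr_w : Int) (r_offset : String) (reg_list : List (String × String × String × String)), Dom_gen_tmp_sub_reg2 b_name r_name addr_w r_offset reg_list → Spec_gen_tmp_sub_reg2 b_name r_name addr_w r_offset reg_list (gen_tmp_sub_reg2 b_name r_name addr_w r_offset reg_list)

-- ===== LEMMAS AND PROOFS =====

theorem chars_join_nil_append (a b : List (List Char)) :
    PySem.Chars.join [] (a ++ b) = PySem.Chars.join [] a ++ PySem.Chars.join [] b := by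
  induction a with
  | nil => simp
  | cons x xs ih =>
    cases xs with
    | nil =>
      cases b with
      | nil => simp
      | cons y ys => simp [PySem.Chars.join_cons_cons, PySem.Chars.join_singleton]
    | cons z zs =>
      simp only [List.cons_append, PySem.Chars.join_cons_cons] at *
      simp [ih, List.append_assoc]

theorem str_join_nil_append (a b : List String) :
    PySem.Str.join "" (a ++ b) = PySem.Str.join "" a ++ PySem.Str.join "" b := by
  simp [PySem.Str.join, chars_join_nil_append]

theorem str_join_nil_nil : PySem.Str.join "" ([] : List String) = "" := by
  simp [PySem.Str.join]

theorem str_join_nil_cons (s : String) (rest : List String) :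
    PySem.Str.join "" (s :: rest) = s ++ PySem.Str.join "" rest := by
  have h := str_join_nil_append [s] rest
  simpa [PySem.Str.join] using h

-- A's loop body emits, for every field, exactly the table-selected lines that B emits
theorem pvStepA_eq (b_name acc : String) (field : String × String × String × String) :
    pvStepA b_name acc field =
      acc ++ PySem.Str.join "" ((pvPortSigTable.getD field.2.2.2 pvPortSigDefault).map (pvLine b_name field.1)) := by
  obtain ⟨fn, x, y, rw⟩ := field
  by_cases h1 : rw = "RW"
  · subst h1
    simp [pvStepA, pvLine, pvPortSigTable, pvPortSigDefault, PySem.Dict.getD, PySem.Dict.get?_mk_cons,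
      PySem.Dict.get?, str_join_nil_cons, str_join_nil_nil, String.append_assoc]
    rw [← String.toList_inj]
    simp
  by_cases h2 : rw = "WO"
  · subst h2
    simp [pvStepA, pvLine, pvPortSigTable, pvPortSigDefault, PySem.Dict.getD, PySem.Dict.get?_mk_cons,
      PySem.Dict.get?, str_join_nil_cons, str_join_nil_nil, String.append_assoc]
    rw [← String.toList_inj]
    simp
  by_cases h3 : rw = "RO"
  · subst h3
    simp [pvStepA, pvLine, pvPortSigTable, pvPortSigDefault, PySem.Dict.getD, PySem.Dict.get?_mk_cons,
      PySem.Dict.get?, str_join_nil_cons, str_join_nil_nil, String.append_assoc]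
    rw [← String.toList_inj]
    simp
  by_cases h4 : rw = "RC"
  · subst h4
    simp [pvStepA, pvLine, pvPortSigTable, pvPortSigDefault, PySem.Dict.getD, PySem.Dict.get?_mk_cons,
      PySem.Dict.get?, str_join_nil_cons, str_join_nil_nil, String.append_assoc]
    rw [← String.toList_inj]
    simp
  by_cases h5 : rw = "RU"
  · subst h5
    simp [pvStepA, pvLine, pvPortSigTable, pvPortSigDefault, PySem.Dict.getD, PySem.Dict.get?_mk_cons,
      PySem.Dict.get?, str_join_nil_cons, str_join_nil_nil, String.append_assoc]
    rw [← String.toList_inj]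
    simp
  · simp [pvStepA, pvLine, pvPortSigTable, pvPortSigDefault, PySem.Dict.getD, PySem.Dict.get?_mk_cons,
      PySem.Dict.get?, str_join_nil_cons, str_join_nil_nil, String.append_assoc, h1, h2, h3, h4, h5,
      Ne.symm h1, Ne.symm h2, Ne.symm h3, Ne.symm h4, Ne.symm h5]
    rw [← String.toList_inj]
    simp

theorem foldA_eq (b_name : String) (l : List (String × String × String × String)) (acc : String) :
    l.foldl (pvStepA b_name) acc =
      acc ++ PySem.Str.join "" (l.flatMap (fun field =>
        (pvPortSigTable.getD field.2.2.2 pvPortSigDefault).map (pvLine b_name field.1))) := by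
  induction l generalizing acc with
  | nil => simp [PySem.Str.join]
  | cons f fs ih =>
    simp only [List.foldl_cons, List.flatMap_cons, str_join_nil_append]
    rw [ih, pvStepA_eq, String.append_assoc]

-- ===== VERDICT (by name: the statement is the Claim_ definition above) =====
theorem gen_tmp_sub_reg2_spec : Claim_equal_gen_tmp_sub_reg2 := by
  intro b_name r_name addr_w r_offset reg_list _
  unfold Spec_gen_tmp_sub_reg2 gen_tmp_sub_reg2 gen_tmp_sub_reg2_alt
  rw [foldA_eq]
  rfl
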